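-- pv_equiv track=rewrite | github.com/serinachang5/bechdel | preprocessing.py | parse_walker
-- ===== SOURCE A (Python) =====
-- def parse_walker(content):
--     lines = []
--     content = content.split("\n")
--     for x in content:
--         if len(x) > 0:
--             lines.append(x)
--
--     tuples = []
--     i = 0
--     while i < len(lines):
--         if lines[i].isupper():
--             char = lines[i]
--             fragments = []
--             i += 1
--             while i < len(lines) and not lines[i].isupper():
--                 fragments.append(lines[i])
--                 i += 1
--             tuples.append((char, " ".join(fragments)))
--         else:
--             i += 1
--     return tuples
-- ===== SOURCE B (Python) =====
-- def parse_walker(content):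
--     lines = [x for x in content.split("\n") if x]
--     bounds = [i for i, l in enumerate(lines) if l.isupper()]
--     ends = bounds[1:] + [len(lines)]
--     return [(lines[p], " ".join(lines[p + 1:e])) for p, e in zip(bounds, ends)]
-- ===== Notes on version B (the rewrite author's own statement) =====
-- stated objective: alternative
-- what changed: Replaces A's index-based nested while walk by first building the table of uppercase-line boundary indices, then emitting each (char, joined slice) tuple from consecutive boundaries.
import Mathlib
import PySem

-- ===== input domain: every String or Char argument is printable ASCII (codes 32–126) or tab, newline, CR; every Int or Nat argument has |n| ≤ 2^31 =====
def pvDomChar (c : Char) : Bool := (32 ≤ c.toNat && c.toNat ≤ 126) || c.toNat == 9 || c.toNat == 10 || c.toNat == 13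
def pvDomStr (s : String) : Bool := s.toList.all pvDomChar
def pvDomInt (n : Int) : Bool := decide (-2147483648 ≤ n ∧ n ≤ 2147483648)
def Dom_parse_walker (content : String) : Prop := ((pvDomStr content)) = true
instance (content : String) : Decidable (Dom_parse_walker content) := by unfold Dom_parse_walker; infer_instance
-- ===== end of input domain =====

-- B replaces A's nested while walk by a boundary-index table plus slice emission (objective: alternative decomposition).

-- ===== PORT A =====
-- str.isupper() (exact on the ASCII domain, where cased characters are exactly the letters):
-- at least one cased character and no lowercase one.
def pyStrIsUpper (s : String) : Bool :=
  s.toList.any (fun c => PySem.Chars.isalpha c) && s.toList.all (fun c => !PySem.Chars.islower c)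

-- inner while loop of A: collect fragments until the next uppercase line, return (fragments, rest)
def walkerFrags : List String → List String × List String
  | [] => ([], [])
  | x :: xs =>
    if !pyStrIsUpper x then
      let r := walkerFrags xs
      (x :: r.1, r.2)
    else ([], x :: xs)

theorem walkerFrags_snd_length : ∀ (xs : List String), (walkerFrags xs).2.length ≤ xs.length
  | [] => Nat.le_refl _
  | x :: xs => by
    simp only [walkerFrags]
    split
    · exact Nat.le_succ_of_le (walkerFrags_snd_length xs)
    · simp

-- outer while loop of A over the remaining lines
def walkerLoop : List String → List (String × String)
  | [] => []
  | l :: rest =>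
    if pyStrIsUpper l then
      let r := walkerFrags rest
      (l, PySem.Str.join " " r.1) :: walkerLoop r.2
    else walkerLoop rest
termination_by xs => xs.length
decreasing_by
  · exact Nat.lt_succ_of_le (walkerFrags_snd_length rest)
  · simp

def parse_walker (content : String) : List (String × String) :=
  let lines := ((PySem.Str.split? content "\n").getD []).filter (fun x => 0 < PySem.Str.len x)
  walkerLoop lines

-- ===== PORT B =====
def parse_walker_alt (content : String) : List (String × String) :=
  let lines := ((PySem.Str.split? content "\n").getD []).filter (fun x => 0 < PySem.Str.len x)
  let bounds := ((PySem.List.enumerate lines 0).filter (fun p => pyStrIsUpper p.2)).map (·.1)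
  let ends := bounds.drop 1 ++ [(lines.length : Int)]
  (bounds.zip ends).map (fun pe =>
    (PySem.List.pyGetD lines pe.1 "",
     PySem.Str.join " " (PySem.List.slice lines (some (pe.1 + 1)) (some pe.2))))

-- ===== PRECONDITION & SPEC =====
def Spec_parse_walker (content : String) (out : List (String × String)) : Prop := out = parse_walker_alt content
instance (content : String) (out : List (String × String)) : Decidable (Spec_parse_walker content out) := by unfold Spec_parse_walker; infer_instance

-- ===== CLAIM (what is proved, stated in full; the proofs are below) =====
def Claim_equal_parse_walker : Prop := ∀ (content : String), Dom_parse_walker content → Spec_parse_walker content (parse_walker content)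

-- ===== LEMMAS AND PROOFS =====

-- boundary indices of a line list, starting at s
def pvBounds (xs : List String) (s : Int) : List Int :=
  ((PySem.List.enumerate xs s).filter (fun p => pyStrIsUpper p.2)).map (·.1)

-- B's emission, abstracted over the pair list
def pvEmit (lines : List String) (pairs : List (Int × Int)) : List (String × String) :=
  pairs.map (fun pe =>
    (PySem.List.pyGetD lines pe.1 "",
     PySem.Str.join " " (PySem.List.slice lines (some (pe.1 + 1)) (some pe.2))))

def pvPairs (lines : List String) : List (Int × Int) :=
  (pvBounds lines 0).zip ((pvBounds lines 0).drop 1 ++ [(lines.length : Int)])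

def pvEmitAll (lines : List String) : List (String × String) :=
  pvEmit lines (pvPairs lines)

theorem pvBounds_shift (xs : List String) : ∀ (s t : Int),
    pvBounds xs (s + t) = (pvBounds xs s).map (· + t) := by
  induction xs with
  | nil => intro s t; simp [pvBounds, PySem.List.enumerate_nil]
  | cons x xs ih =>
    intro s t
    simp only [pvBounds, PySem.List.enumerate_cons, List.filter_cons]
    by_cases h : pyStrIsUpper x
    · simp only [h]
      have := ih (s + 1) t
      simp only [pvBounds] at this
      simp [List.map_cons, add_right_comm s t 1 ▸ this]
    · simp only [h]
      have := ih (s + 1) t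
      simp only [pvBounds] at this
      simp [add_right_comm s t 1 ▸ this]

theorem pvBounds_nil_of_no_upper (xs : List String) (s : Int)
    (h : ∀ x ∈ xs, pyStrIsUpper x = false) : pvBounds xs s = [] := by
  induction xs generalizing s with
  | nil => simp [pvBounds, PySem.List.enumerate_nil]
  | cons x xs ih =>
    simp only [pvBounds, PySem.List.enumerate_cons, List.filter_cons]
    have hx : pyStrIsUpper x = false := h x (by simp)
    simp only [hx]
    have := ih (fun y hy => h y (by simp [hy])) (s := s + 1)
    simp only [pvBounds] at this
    simp [this]

theorem pvBounds_nonneg (xs : List String) : ∀ p ∈ pvBounds xs 0, 0 ≤ p := by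
  intro p hp
  simp only [pvBounds, List.mem_map, List.mem_filter] at hp
  obtain ⟨⟨i, x⟩, ⟨hmem, _⟩, rfl⟩ := hp
  rw [PySem.List.mem_enumerate_iff] at hmem
  obtain ⟨k, hk, hpq⟩ := hmem
  simp at hpq
  omega

theorem walkerFrags_eq (xs : List String) :
    walkerFrags xs = (xs.takeWhile (fun x => !pyStrIsUpper x), xs.dropWhile (fun x => !pyStrIsUpper x)) := by
  induction xs with
  | nil => simp [walkerFrags]
  | cons x xs ih =>
    simp only [walkerFrags, List.takeWhile_cons, List.dropWhile_cons]
    by_cases h : pyStrIsUpper x <;> simp [h, ih]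

-- one cons-shift of the emission: shifting all indices by 1 over a cons leaves the output unchanged
theorem pvEmit_cons_shift (x : String) (lines : List String) (pairs : List (Int × Int))
    (h : ∀ pe ∈ pairs, 0 ≤ pe.1 ∧ 0 ≤ pe.2) :
    pvEmit (x :: lines) (pairs.map (fun pe => (pe.1 + 1, pe.2 + 1))) = pvEmit lines pairs := by
  induction pairs with
  | nil => simp [pvEmit]
  | cons pe ps ih =>
    obtain ⟨h1, h2⟩ := h pe (by simp)
    simp only [pvEmit, List.map_cons, List.map_map] at *
    refine congrArg₂ List.cons ?_ (ih (fun q hq => h q (by simp [hq])))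
    have hg : PySem.List.pyGetD (x :: lines) (pe.1 + 1) "" = PySem.List.pyGetD lines pe.1 "" := by
      obtain ⟨a, ha⟩ := Int.eq_ofNat_of_zero_le h1
      rw [ha, show ((a : Int) + 1) = ((a + 1 : Nat) : Int) by push_cast; ring,
        PySem.List.pyGetD_natCast, PySem.List.pyGetD_natCast]
      simp
    have hs : PySem.List.slice (x :: lines) (some (pe.1 + 1 + 1)) (some (pe.2 + 1))
        = PySem.List.slice lines (some (pe.1 + 1)) (some pe.2) := by
      rw [PySem.List.slice_toNat _ (by omega) (by omega), PySem.List.slice_toNat _ (by omega) (by omega)]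
      rw [show (pe.1 + 1 + 1).toNat = (pe.1 + 1).toNat + 1 by omega]
      rw [show (pe.2 + 1).toNat - ((pe.1 + 1).toNat + 1) = pe.2.toNat - (pe.1 + 1).toNat by omega]
      rw [List.drop_succ_cons]
    rw [hg, hs]

-- shift over an arbitrary prefix
theorem pvEmit_prefix_shift (pre : List String) : ∀ (lines : List String) (pairs : List (Int × Int)),
    (∀ pe ∈ pairs, 0 ≤ pe.1 ∧ 0 ≤ pe.2) →
    pvEmit (pre ++ lines) (pairs.map (fun pe => (pe.1 + pre.length, pe.2 + pre.length))) = pvEmit lines pairs := by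
  induction pre with
  | nil => intro lines pairs _; simp
  | cons x pre ih =>
    intro lines pairs h
    have step := pvEmit_cons_shift x (pre ++ lines)
      (pairs.map (fun pe => (pe.1 + pre.length, pe.2 + pre.length)))
      (by rintro pe hpe; simp only [List.mem_map] at hpe; obtain ⟨q, hq, rfl⟩ := hpe
          obtain ⟨a, b⟩ := h q hq; constructor <;> simp <;> omega)
    rw [ih lines pairs h] at step
    rw [← step]
    congr 1
    simp only [List.map_map]
    apply List.map_congr_left
    intro q _
    simp only [Function.comp, List.length_cons, Prod.mk.injEq]
    constructor <;> push_cast <;> ring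

theorem pvZip_pairs_nonneg (b : List Int) (n : Int) (hb : ∀ p ∈ b, 0 ≤ p) (hn : 0 ≤ n) :
    ∀ pe ∈ b.zip (b.drop 1 ++ [n]), 0 ≤ pe.1 ∧ 0 ≤ pe.2 := by
  intro pe hpe
  obtain ⟨hl, hr⟩ := List.of_mem_zip hpe
  refine ⟨hb _ hl, ?_⟩
  rcases List.mem_append.mp hr with h | h
  · exact hb _ (List.mem_of_mem_drop h)
  · simp at h; omega

-- shifting every boundary by c shifts every emitted pair by c
theorem pvZip_shift (b : List Int) (n c : Int) :
    (b.map (· + c)).zip ((b.map (· + c)).drop 1 ++ [n + c])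
      = (b.zip (b.drop 1 ++ [n])).map (fun pe => (pe.1 + c, pe.2 + c)) := by
  rw [← List.map_drop, show (b.drop 1).map (· + c) ++ [n + c] = (b.drop 1 ++ [n]).map (· + c) by simp,
    List.zip_map]
  apply List.map_congr_left
  intro q _
  rfl

-- the uppercase-head step: one emitted tuple, then the shifted remainder
theorem pvUpper_step (l : String) (fr tl : List String)
    (hu : pyStrIsUpper l = true)
    (hfrno : ∀ x ∈ fr, pyStrIsUpper x = false)
    (ht0 : ∀ t0 ts, tl = t0 :: ts → pyStrIsUpper t0 = true)
    (hrec : walkerLoop tl = pvEmitAll tl) :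
    (l, PySem.Str.join " " fr) :: walkerLoop tl = pvEmitAll (l :: (fr ++ tl)) := by
  have hb_rest : pvBounds (fr ++ tl) 0 = (pvBounds tl 0).map (· + (fr.length : Int)) := by
    simp only [pvBounds, PySem.List.enumerate_append, List.filter_append, List.map_append]
    rw [show ((PySem.List.enumerate fr 0).filter (fun p => pyStrIsUpper p.2)).map (·.1)
          = pvBounds fr 0 from rfl]
    rw [pvBounds_nil_of_no_upper fr 0 hfrno]
    have := pvBounds_shift tl 0 (fr.length : Int)
    simp only [pvBounds, zero_add] at this
    simp [this]
  have hbL : pvBounds (l :: (fr ++ tl)) 0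
      = 0 :: (pvBounds tl 0).map (· + ((fr.length : Int) + 1)) := by
    simp only [pvBounds, PySem.List.enumerate_cons, List.filter_cons, hu, ite_true, zero_add,
      List.map_cons]
    rw [show ((PySem.List.enumerate (fr ++ tl) 1).filter (fun p => pyStrIsUpper p.2)).map (·.1)
          = pvBounds (fr ++ tl) 1 from rfl,
      show (1 : Int) = 0 + 1 by ring, pvBounds_shift (fr ++ tl) 0 1, hb_rest, List.map_map]
    simp only [List.cons.injEq, true_and]
    apply List.map_congr_left
    intro a _
    simp [Function.comp]; ring
  match tl, hrec with
  | [], _ =>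
    rw [walkerLoop]
    simp only [pvEmitAll, pvPairs]
    rw [hbL]
    simp only [List.append_nil]
    simp only [pvBounds, PySem.List.enumerate_nil, List.filter_nil, List.map_nil,
      List.drop_succ_cons, List.drop_nil, List.nil_append, List.zip_cons_cons,
      List.zip_nil_right, pvEmit, List.map_cons]
    rw [PySem.List.pyGetD_zero_cons]
    rw [show PySem.List.slice (l :: fr) (some ((0 : Int) + 1)) (some ((l :: fr).length : Int))
          = fr from by
      rw [show ((0 : Int) + 1) = ((1 : Nat) : Int) by norm_num,
        show (((l :: fr).length : Int)) = (((l :: fr).length : Nat) : Int) by norm_num,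
        PySem.List.slice_natCast]
      simp]
  | t0 :: ts, hrec =>
    have ht0' : pyStrIsUpper t0 = true := ht0 t0 ts rfl
    have hbtl : pvBounds (t0 :: ts) 0 = 0 :: (pvBounds ts 0).map (· + 1) := by
      simp only [pvBounds, PySem.List.enumerate_cons, List.filter_cons, ht0']
      have := pvBounds_shift ts 0 1
      simp only [pvBounds, zero_add] at this
      simp [this]
    have hlenL : ((l :: (fr ++ t0 :: ts)).length : Int)
        = ((t0 :: ts).length : Int) + ((fr.length : Int) + 1) := by
      simp; ring
    rw [hrec]
    simp only [pvEmitAll, pvPairs, hbL]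
    rw [hbtl]
    simp only [List.map_cons, zero_add, List.drop_succ_cons, List.drop_zero, List.cons_append]
    rw [List.zip_cons_cons]
    simp only [pvEmit, List.map_cons]
    refine congrArg₂ List.cons ?_ ?_
    · -- head tuple
      rw [PySem.List.pyGetD_zero_cons]
      rw [show PySem.List.slice (l :: (fr ++ t0 :: ts)) (some ((0 : Int) + 1))
            (some ((fr.length : Int) + 1)) = fr from by
        rw [show ((0 : Int) + 1) = ((1 : Nat) : Int) by norm_num,
          show ((fr.length : Int) + 1) = (((fr.length + 1 : Nat)) : Int) by push_cast; ring,
          PySem.List.slice_natCast]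
        simp only [List.drop_one, List.tail_cons]
        exact List.take_left' rfl]
    · -- tail: pvZip_shift then prefix shift over (l :: fr)
      have hzip := pvZip_shift (pvBounds (t0 :: ts) 0) ((t0 :: ts).length : Int)
        ((fr.length : Int) + 1)
      rw [hbtl] at hzip
      simp only [List.map_cons, zero_add, List.drop_succ_cons, List.drop_zero,
        List.map_map] at hzip
      rw [show ((l :: (fr ++ t0 :: ts)).length : Int)
            = ((t0 :: ts).length : Int) + ((fr.length : Int) + 1) from hlenL]
      simp only [List.map_map]
      rw [hzip]
      have hnn := pvZip_pairs_nonneg (pvBounds (t0 :: ts) 0) ((t0 :: ts).length : Int)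
        (pvBounds_nonneg _) (by positivity)
      rw [hbtl] at hnn
      simp only [List.drop_succ_cons, List.drop_zero] at hnn
      have hshift := pvEmit_prefix_shift (l :: fr) (t0 :: ts)
        ((0 :: (pvBounds ts 0).map (· + 1)).zip ((pvBounds ts 0).map (· + 1) ++ [((t0 :: ts).length : Int)]))
        hnn
      rw [show (l :: fr) ++ (t0 :: ts) = l :: (fr ++ t0 :: ts) from by simp] at hshift
      rw [show (((l :: fr).length : Nat) : Int) = (fr.length : Int) + 1 from by push_cast [List.length_cons]; ring] at hshift
      simp only [pvEmit] at hshift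
      rw [← hshift]

-- the key lemma: A's walk equals B's boundary emission
theorem walkerLoop_eq_emit : ∀ (n : Nat) (lines : List String), lines.length ≤ n →
    walkerLoop lines = pvEmitAll lines := by
  intro n
  induction n with
  | zero =>
    intro lines h
    match lines with
    | [] => simp [walkerLoop, pvEmitAll, pvPairs, pvEmit, pvBounds, PySem.List.enumerate_nil]
    | x :: _ => simp at h
  | succ n ih =>
    intro lines hlen
    match lines with
    | [] => simp [walkerLoop, pvEmitAll, pvPairs, pvEmit, pvBounds, PySem.List.enumerate_nil]
    | l :: rest =>
      by_cases hu : pyStrIsUpper l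
      · -- uppercase head: reduce to the step lemma with fr/tl the takeWhile/dropWhile split
        rw [walkerLoop]
        simp only [hu, if_pos]
        rw [walkerFrags_eq rest]
        have hsplit : rest = rest.takeWhile (fun x => !pyStrIsUpper x)
            ++ rest.dropWhile (fun x => !pyStrIsUpper x) := (List.takeWhile_append_dropWhile).symm
        conv_rhs => rw [hsplit]
        apply pvUpper_step l _ _ hu
        · intro x hx
          have := List.mem_takeWhile_imp hx
          simpa using this
        · intro t0 ts hts
          have hts' : rest.dropWhile (fun x => !pyStrIsUpper x) = t0 :: ts := hts
          have hne : rest.dropWhile (fun x => !pyStrIsUpper x) ≠ [] := by rw [hts']; simp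
          have h2 := List.head_dropWhile_not (fun x => !pyStrIsUpper x) (l := rest) hne
          simp only [hts'] at h2
          simpa using h2
        · apply ih
          show (rest.dropWhile (fun x => !pyStrIsUpper x)).length ≤ n
          have h1 := List.length_dropWhile_le (fun x => !pyStrIsUpper x) rest
          simp only [List.length_cons] at hlen
          omega
      · -- non-uppercase head: both sides drop it
        rw [walkerLoop]
        simp only [hu, if_neg, Bool.false_eq_true, not_false_iff]
        have hlt : rest.length ≤ n := by simp only [List.length_cons] at hlen; omega
        rw [ih rest hlt]
        have hb : pvBounds (l :: rest) 0 = (pvBounds rest 0).map (· + 1) := by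
          simp only [pvBounds, PySem.List.enumerate_cons, List.filter_cons, hu]
          have := pvBounds_shift rest 0 1
          simp only [pvBounds, zero_add] at this
          simp [this]
        simp only [pvEmitAll, pvPairs, hb]
        rw [show ((l :: rest).length : Int) = (rest.length : Int) + 1 by simp]
        rw [pvZip_shift (pvBounds rest 0) (rest.length : Int) 1]
        exact (pvEmit_cons_shift l rest _
          (pvZip_pairs_nonneg (pvBounds rest 0) (rest.length : Int) (pvBounds_nonneg rest) (by positivity))).symm

theorem parse_walker_alt_eq_emitAll (content : String) :
    parse_walker_alt content
      = pvEmitAll (((PySem.Str.split? content "\n").getD []).filter (fun x => 0 < PySem.Str.len x)) := rfl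

-- ===== VERDICT (by name: the statement is the Claim_ definition above) =====
theorem parse_walker_spec : Claim_equal_parse_walker := by
  intro content _
  unfold Spec_parse_walker
  rw [parse_walker_alt_eq_emitAll]
  exact walkerLoop_eq_emit _ _ (Nat.le_refl _)
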